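-- pv_equiv track=rewrite | github.com/bschink/pocket-narrator | scripts/preprocess.py | build_duplicate_map
-- ===== SOURCE A (Python) =====
-- def build_duplicate_map(stories: list[str]) -> dict[int, list[str]]:
--     """Detect exact-text duplicates after whitespace normalization & lowercasing."""
--     seen: dict[str, int] = {}
--     dup_reasons: dict[int, list[str]] = {}
--     for idx, s in enumerate(stories):
--         key = " ".join(s.split()).lower()
--         if key in seen:
--             dup_reasons[idx] = [f"duplicate_of_{seen[key]}"]
--         else:
--             seen[key] = idx
--     return dup_reasons
-- ===== SOURCE B (Python) =====
-- def build_duplicate_map(stories: list[str]) -> dict[int, list[str]]: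
--     """Detect exact-text duplicates after whitespace normalization & lowercasing."""
--     keys = [" ".join(s.split()).lower() for s in stories]
--     first: dict[str, int] = {}
--     for idx, k in enumerate(keys):
--         first.setdefault(k, idx)
--     return {idx: [f"duplicate_of_{first[k]}"]
--             for idx, k in enumerate(keys) if first[k] != idx}
-- ===== Notes on version B (the rewrite author's own statement) =====
-- stated objective: alternative
-- what changed: Replaces A's single-pass incremental seen-dict membership check with a two-phase decomposition: one pass builds the full first-occurrence table via setdefault over precomputed normalized keys, then a comprehension emits every index whose table entry is not itself.
import Mathlib
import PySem

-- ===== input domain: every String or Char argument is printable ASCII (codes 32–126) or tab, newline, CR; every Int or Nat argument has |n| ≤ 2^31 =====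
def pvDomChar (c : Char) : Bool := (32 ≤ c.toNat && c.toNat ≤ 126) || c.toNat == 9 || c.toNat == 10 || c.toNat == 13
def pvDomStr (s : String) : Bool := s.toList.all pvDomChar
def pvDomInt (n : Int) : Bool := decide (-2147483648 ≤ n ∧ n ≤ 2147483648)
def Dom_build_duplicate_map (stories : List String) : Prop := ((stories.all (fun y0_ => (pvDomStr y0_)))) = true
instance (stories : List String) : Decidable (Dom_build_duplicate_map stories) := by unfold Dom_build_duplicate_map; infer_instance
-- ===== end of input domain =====

-- B replaces A's incremental seen-dict check with a build-first-occurrence-table-then-scan decomposition (same cost; objective: alternative).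

-- key = " ".join(s.split()).lower()  (shared by both Pythons verbatim)
def pvNorm (s : String) : String := PySem.Str.lower (PySem.Str.join " " (PySem.Str.split₀ s))

-- ===== PORT A =====
def build_duplicate_map (stories : List String) : List (Int × List String) :=
  let st :=
    (PySem.List.enumerate stories).foldl
      (fun (st : PySem.Dict String Int × PySem.Dict Int (List String)) p =>
        let key := pvNorm p.2
        match st.1.get? key with
        | some j => (st.1, st.2.insert p.1 ["duplicate_of_" ++ PySem.Int.toStr j])
        | none   => (st.1.insert key p.1, st.2))
      (PySem.Dict.empty, PySem.Dict.empty)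
  st.2.items

-- ===== PORT B =====
def build_duplicate_map_alt (stories : List String) : List (Int × List String) :=
  let keys := stories.map pvNorm
  let first :=
    (PySem.List.enumerate keys).foldl
      (fun (d : PySem.Dict String Int) p => d.setdefault p.2 p.1) PySem.Dict.empty
  (PySem.List.enumerate keys).foldl
    (fun (out : List (Int × List String)) p =>
      if first.getD p.2 0 ≠ p.1 then
        out ++ [(p.1, ["duplicate_of_" ++ PySem.Int.toStr (first.getD p.2 0)])]
      else out) []

-- ===== PRECONDITION & SPEC =====
def Spec_build_duplicate_map (stories : List String) (out : List (Int × List String)) : Prop := out = build_duplicate_map_alt stories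
instance (stories : List String) (out : List (Int × List String)) : Decidable (Spec_build_duplicate_map stories out) := by unfold Spec_build_duplicate_map; infer_instance

-- ===== CLAIM (what is proved, stated in full; the proofs are below) =====
def Claim_equal_build_duplicate_map : Prop := ∀ (stories : List String), Dom_build_duplicate_map stories → Spec_build_duplicate_map stories (build_duplicate_map stories)

-- ===== LEMMAS AND PROOFS =====

-- A's loop body, over pre-normalized keys
def pvStepA (st : PySem.Dict String Int × PySem.Dict Int (List String)) (p : Int × String) :
    PySem.Dict String Int × PySem.Dict Int (List String) :=
  match st.1.get? p.2 with
  | some j => (st.1, st.2.insert p.1 ["duplicate_of_" ++ PySem.Int.toStr j])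
  | none   => (st.1.insert p.2 p.1, st.2)

-- B's first-occurrence table built from position i onward, starting from `seen`
def pvFirstD (seen : PySem.Dict String Int) (i : Int) (ks : List String) : PySem.Dict String Int :=
  (PySem.List.enumerate ks i).foldl (fun d p => d.setdefault p.2 p.1) seen

lemma pvFirstD_nil (seen : PySem.Dict String Int) (i : Int) : pvFirstD seen i [] = seen := rfl

lemma pvFirstD_cons (seen : PySem.Dict String Int) (i : Int) (k : String) (ks : List String) :
    pvFirstD seen i (k :: ks) = pvFirstD (seen.setdefault k i) (i + 1) ks := by
  simp [pvFirstD, PySem.List.enumerate_cons]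

lemma pvFirstD_preserve (ks : List String) (seen : PySem.Dict String Int) (i : Int)
    (k : String) (j : Int) (h : seen.get? k = some j) :
    (pvFirstD seen i ks).get? k = some j := by
  induction ks generalizing seen i with
  | nil => simpa [pvFirstD_nil] using h
  | cons k' ks ih =>
    rw [pvFirstD_cons]
    apply ih
    by_cases hk : k = k'
    · subst hk; rw [PySem.Dict.get?_setdefault_self, h]; rfl
    · rw [PySem.Dict.get?_setdefault_of_ne _ _ hk, h]

lemma pvMain (ks : List String) (i : Int) (seen : PySem.Dict String Int)
    (dup : PySem.Dict Int (List String))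
    (h1 : ∀ k j, seen.get? k = some j → j < i)
    (h2 : ∀ m, dup.contains m = true → m < i) :
    ((PySem.List.enumerate ks i).foldl pvStepA (seen, dup)).2.items
      = dup.items ++
        ((PySem.List.enumerate ks i).filter
            (fun p => (pvFirstD seen i ks).getD p.2 0 ≠ p.1)).map
          (fun p => (p.1, ["duplicate_of_" ++ PySem.Int.toStr ((pvFirstD seen i ks).getD p.2 0)])) := by
  induction ks generalizing i seen dup with
  | nil => simp [PySem.List.enumerate_nil]
  | cons k ks ih =>
    rw [PySem.List.enumerate_cons]
    cases hg : seen.get? k with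
    | some j =>
      have hc : seen.contains k = true := by
        rw [PySem.Dict.contains_eq_isSome_get?, hg]; rfl
      have hF : pvFirstD seen i (k :: ks) = pvFirstD seen (i + 1) ks := by
        rw [pvFirstD_cons, PySem.Dict.setdefault_of_contains _ _ hc]
      have hget : (pvFirstD seen i (k :: ks)).get? k = some j := by
        rw [hF]; exact pvFirstD_preserve _ _ _ _ _ hg
      have hgd : (pvFirstD seen i (k :: ks)).getD k 0 = j :=
        PySem.Dict.getD_of_get?_eq_some _ _ hget
      have hji : j < i := h1 k j hg
      have hdupc : dup.contains i = false := by
        cases hdc : dup.contains i with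
        | false => rfl
        | true => exact absurd (h2 i hdc) (lt_irrefl i)
      have hstep : pvStepA (seen, dup) (i, k)
          = (seen, dup.insert i ["duplicate_of_" ++ PySem.Int.toStr j]) := by
        simp [pvStepA, hg]
      rw [List.foldl_cons, hstep,
        ih (i + 1) seen _ (fun k' j' h' => lt_trans (h1 k' j' h') (by omega))
          (fun m hm => by
            rw [PySem.Dict.contains_insert] at hm
            rcases Bool.or_eq_true_iff.mp hm with hmi | hmd
            · have : m = i := by simpa using hmi
              omega
            · exact lt_trans (h2 m hmd) (by omega)),
        PySem.Dict.items_insert_of_not_contains _ _ hdupc]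
      have hjne : j ≠ i := ne_of_lt hji
      simp only [hF] at hgd ⊢
      simp [hgd, hjne]
    | none =>
      have hc : seen.contains k = false := by
        rw [PySem.Dict.contains_eq_isSome_get?, hg]; rfl
      have hF : pvFirstD seen i (k :: ks) = pvFirstD (seen.insert k i) (i + 1) ks := by
        rw [pvFirstD_cons, PySem.Dict.setdefault_of_not_contains _ _ hc]
      have hget : (pvFirstD seen i (k :: ks)).get? k = some i := by
        rw [hF]
        exact pvFirstD_preserve _ _ _ _ _ (PySem.Dict.get?_insert_self _ _ _)
      have hgd : (pvFirstD seen i (k :: ks)).getD k 0 = i :=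
        PySem.Dict.getD_of_get?_eq_some _ _ hget
      have hstep : pvStepA (seen, dup) (i, k) = (seen.insert k i, dup) := by
        simp [pvStepA, hg]
      rw [List.foldl_cons, hstep,
        ih (i + 1) (seen.insert k i) dup
          (fun k' j' h' => by
            by_cases hk : k' = k
            · subst hk
              rw [PySem.Dict.get?_insert_self] at h'
              injection h' with h''
              omega
            · rw [PySem.Dict.get?_insert_of_ne _ _ hk] at h'
              exact lt_trans (h1 k' j' h') (by omega))
          (fun m hm => lt_trans (h2 m hm) (by omega))]
      simp only [hF] at hgd ⊢
      simp [hgd]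

-- the A-side fold over enumerate stories equals the same fold over enumerate of the normalized keys
lemma pvEnumerate_map {α β : Type} (f : α → β) (xs : List α) (i : Int) :
    PySem.List.enumerate (xs.map f) i = (PySem.List.enumerate xs i).map (fun p => (p.1, f p.2)) := by
  induction xs generalizing i with
  | nil => simp [PySem.List.enumerate_nil]
  | cons x xs ih => simp [PySem.List.enumerate_cons, ih]

lemma pvFoldlAppendIte {A B : Type} (p : A → Prop) [DecidablePred p] (f : A → B)
    (l : List A) (acc : List B) :
    l.foldl (fun acc x => if p x then acc ++ [f x] else acc) acc
      = acc ++ (l.filter (fun x => decide (p x))).map f := by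
  induction l generalizing acc with
  | nil => simp
  | cons x l ih =>
    rw [List.foldl_cons, ih, List.filter_cons]
    by_cases hx : p x <;> simp [hx]

-- ===== VERDICT (by name: the statement is the Claim_ definition above) =====
theorem build_duplicate_map_spec : Claim_equal_build_duplicate_map := by
  intro stories _
  show build_duplicate_map stories = build_duplicate_map_alt stories
  have hA : build_duplicate_map stories
      = ((PySem.List.enumerate (stories.map pvNorm) 0).foldl pvStepA
          (PySem.Dict.empty, PySem.Dict.empty)).2.items := by
    rw [pvEnumerate_map, List.foldl_map]
    rfl
  have hB : build_duplicate_map_alt stories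
      = [] ++ ((PySem.List.enumerate (stories.map pvNorm) 0).filter
            (fun p => decide ((pvFirstD PySem.Dict.empty 0 (stories.map pvNorm)).getD p.2 0 ≠ p.1))).map
          (fun p => (p.1,
            ["duplicate_of_" ++ PySem.Int.toStr ((pvFirstD PySem.Dict.empty 0 (stories.map pvNorm)).getD p.2 0)])) :=
    pvFoldlAppendIte
      (fun q : Int × String => (pvFirstD PySem.Dict.empty 0 (stories.map pvNorm)).getD q.2 0 ≠ q.1)
      (fun q : Int × String => (q.1,
        ["duplicate_of_" ++ PySem.Int.toStr ((pvFirstD PySem.Dict.empty 0 (stories.map pvNorm)).getD q.2 0)]))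
      (PySem.List.enumerate (stories.map pvNorm) 0) []
  rw [hA, pvMain (stories.map pvNorm) 0 PySem.Dict.empty PySem.Dict.empty
      (fun k j h => by simp [PySem.Dict.get?_empty] at h)
      (fun m hm => by simp [PySem.Dict.contains_empty] at hm), hB]
  rfl
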